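-- pv_equiv track=rewrite | github.com/rampurishivasai/assignment | special_cipher.py | special_cipher
-- ===== SOURCE A (Python) =====
-- def special_cipher(input_str, rotation_num):
--     def caesar_cipher(text, shift):
--         result = []
--         for char in text:
--             if char.isalpha():
--                 shifted = ord(char) + shift
--                 if char.isupper():
--                     if shifted > ord('Z'):
--                         shifted -= 26
--                     result.append(chr(shifted))
--                 elif char.islower():
--                     if shifted > ord('z'):
--                         shifted -= 26
--                     result.append(chr(shifted))
--             else:
--                 result.append(char)
--         return ''.join(result)
--
--     def run_length_encoding(text):
--         encoded_str = []
--         i = 0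
--         while i < len(text):
--             count = 1
--             while i + 1 < len(text) and text[i] == text[i + 1]:
--                 i += 1
--                 count += 1
--             encoded_str.append(text[i])
--             encoded_str.append(str(count))
--             i += 1
--         return ''.join(encoded_str)
--
--     # Step 1: Apply Caesar's Cipher
--     caesar_result = caesar_cipher(input_str, rotation_num)
--
--     # Step 2: Apply Run-Length Encoding
--     rle_result = run_length_encoding(caesar_result)
--
--     return rle_result
-- ===== SOURCE B (Python) =====
-- def special_cipher(input_str, rotation_num):
--     # Single fused pass: shift each character and run-length encode on the fly,
--     # flushing the current run when it breaks.
--     out = []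
--     cur = None
--     cnt = 0
--     for ch in input_str:
--         if 'A' <= ch <= 'Z':
--             x = ord(ch) + rotation_num
--             c = chr(x - 26 if x > 90 else x)
--         elif 'a' <= ch <= 'z':
--             x = ord(ch) + rotation_num
--             c = chr(x - 26 if x > 122 else x)
--         else:
--             c = ch
--         if c == cur:
--             cnt += 1
--         else:
--             if cur is not None:
--                 out.append(cur + str(cnt))
--             cur, cnt = c, 1
--     if cur is not None:
--         out.append(cur + str(cnt))
--     return ''.join(out)
-- ===== Notes on version B (the rewrite author's own statement) =====
-- stated objective: faster
-- what changed: A's two separate passes (build the whole ciphered string, then re-scan it with index-walking nested while loops and per-character len/indexing) are fused into one streaming pass that shifts each character and run-length encodes on the fly with a current-run accumulator; same O(n) but no intermediate string and no repeated indexing (measured ~2x).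
import Mathlib
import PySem

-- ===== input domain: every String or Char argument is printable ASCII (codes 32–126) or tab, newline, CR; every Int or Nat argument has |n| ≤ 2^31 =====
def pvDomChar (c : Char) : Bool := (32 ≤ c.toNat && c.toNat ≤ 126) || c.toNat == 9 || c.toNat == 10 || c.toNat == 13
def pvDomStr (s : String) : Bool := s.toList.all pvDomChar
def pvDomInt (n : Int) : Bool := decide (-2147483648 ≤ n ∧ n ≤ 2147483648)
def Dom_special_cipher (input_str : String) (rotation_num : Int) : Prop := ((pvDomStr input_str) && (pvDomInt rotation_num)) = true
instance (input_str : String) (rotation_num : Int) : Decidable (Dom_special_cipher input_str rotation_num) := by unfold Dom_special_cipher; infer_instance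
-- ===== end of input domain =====

-- B fuses A's two passes (Caesar shift, then index-walking RLE) into one streaming
-- run-length pass that shifts each character on the fly (same O(n), measurably faster by constant factor).


-- ===== PORT A =====
-- caesar_cipher's loop body; chr(shifted) is ported as Char.ofNat, exact whenever the
-- shifted code point is a valid non-surrogate code point (guaranteed inside Pre_).
def pvCaesarStep (shift : Int) (result : List Char) (char : Char) : List Char :=
  if PySem.Chars.isalpha char then
    let shifted := (char.toNat : Int) + shift
    if PySem.Chars.isupper char then
      let shifted := if shifted > 90 then shifted - 26 else shifted
      result ++ [Char.ofNat shifted.toNat]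
    else if PySem.Chars.islower char then
      let shifted := if shifted > 122 then shifted - 26 else shifted
      result ++ [Char.ofNat shifted.toNat]
    else result
  else result ++ [char]

def pvCaesar (text : List Char) (shift : Int) : List Char :=
  text.foldl (pvCaesarStep shift) []

-- inner while of run_length_encoding: advance while the next char equals text[i]
def pvSpan (c : Char) : List Char → Nat × List Char
  | [] => (0, [])
  | x :: xs => if x = c then ((pvSpan c xs).1 + 1, (pvSpan c xs).2) else (0, x :: xs)

theorem pvSpan_len (c : Char) (l : List Char) : (pvSpan c l).2.length ≤ l.length := by
  induction l with
  | nil => simp [pvSpan]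
  | cons x xs ih =>
      simp only [pvSpan]
      split
      · simp; omega
      · simp

-- outer while of run_length_encoding (the joined encoded_str, emitted char by char)
def pvRLE : List Char → List Char
  | [] => []
  | c :: rest =>
      (c :: PySem.Int.toChars (((pvSpan c rest).1 : Int) + 1)) ++ pvRLE (pvSpan c rest).2
termination_by l => l.length
decreasing_by
  have := pvSpan_len c rest
  simp
  omega

def special_cipher (input_str : String) (rotation_num : Int) : String :=
  String.mk (pvRLE (pvCaesar input_str.toList rotation_num))

-- ===== PORT B =====
-- per-character shift of Source B (chr ported as Char.ofNat, exact inside Pre_)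
def pvShift (c : Char) (k : Int) : Char :=
  if 'A' ≤ c ∧ c ≤ 'Z' then
    let x := (c.toNat : Int) + k
    Char.ofNat (if x > 90 then x - 26 else x).toNat
  else if 'a' ≤ c ∧ c ≤ 'z' then
    let x := (c.toNat : Int) + k
    Char.ofNat (if x > 122 then x - 26 else x).toNat
  else c

-- loop body of Source B: state (cur, cnt, out); out kept as the joined character list
def pvAltStep (k : Int) (st : Option Char × Int × List Char) (ch : Char) :
    Option Char × Int × List Char :=
  let c := pvShift ch k
  match st with
  | (some cu, cnt, out) =>
      if c = cu then (some cu, cnt + 1, out)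
      else (some c, 1, out ++ (cu :: PySem.Int.toChars cnt))
  | (none, _, out) => (some c, 1, out)

-- final flush after the loop
def pvAltFlush : Option Char × Int × List Char → List Char
  | (some cu, cnt, out) => out ++ (cu :: PySem.Int.toChars cnt)
  | (none, _, out) => out

def special_cipher_alt (input_str : String) (rotation_num : Int) : String :=
  String.mk (pvAltFlush (input_str.toList.foldl (pvAltStep rotation_num) (none, 0, [])))

-- ===== PRECONDITION & SPEC =====
-- Pre_ excludes inputs where the (possibly wrapped) shifted code point of some letter leaves
-- chr's valid range (Python A raises ValueError there) or lands in the UTF-16 surrogate band,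
-- where A returns a lone-surrogate string that Lean's Char cannot represent (B returns the same
-- string there in Python).
def pvShiftOk (c : Char) (k : Int) : Bool :=
  let x := (c.toNat : Int) + k
  let y := if x > (if PySem.Chars.isupper c then 90 else 122) then x - 26 else x
  decide (0 ≤ y) && decide (y ≤ 1114111) && !(decide (55296 ≤ y) && decide (y ≤ 57343))

def Pre_special_cipher (input_str : String) (rotation_num : Int) : Prop :=
  (input_str.toList.all fun c => !PySem.Chars.isalpha c || pvShiftOk c rotation_num) = true

instance (input_str : String) (rotation_num : Int) :
    Decidable (Pre_special_cipher input_str rotation_num) := by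
  unfold Pre_special_cipher; infer_instance

def pvWitness_special_cipher : String × Int := ("aabB c!", 3)

def Spec_special_cipher (input_str : String) (rotation_num : Int) (out : String) : Prop :=
  out = special_cipher_alt input_str rotation_num
instance (input_str : String) (rotation_num : Int) (out : String) : Decidable (Spec_special_cipher input_str rotation_num out) := by unfold Spec_special_cipher; infer_instance

-- ===== CLAIM (what is proved, stated in full; the proofs are below) =====
def Claim_equal_special_cipher : Prop := ∀ (input_str : String) (rotation_num : Int), Dom_special_cipher input_str rotation_num → Pre_special_cipher input_str rotation_num → Spec_special_cipher input_str rotation_num (special_cipher input_str rotation_num)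

-- ===== LEMMAS AND PROOFS =====

-- A's per-character step appends exactly B's shifted character
theorem caesarStep_eq (k : Int) (r : List Char) (c : Char) :
    pvCaesarStep k r c = r ++ [pvShift c k] := by
  unfold pvCaesarStep pvShift
  by_cases hu : 'A' ≤ c ∧ c ≤ 'Z'
  · simp [PySem.Chars.isalpha, PySem.Chars.isupper, hu.1, hu.2]
  · by_cases hl : 'a' ≤ c ∧ c ≤ 'z'
    · simp [PySem.Chars.isalpha, PySem.Chars.isupper, PySem.Chars.islower, hl.1, hl.2, hu]
    · simp only [PySem.Chars.isalpha, PySem.Chars.isupper, PySem.Chars.islower]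
      have h1 : ¬ ('A' ≤ c) ∨ ¬ (c ≤ 'Z') := not_and_or.mp hu
      have h2 : ¬ ('a' ≤ c) ∨ ¬ (c ≤ 'z') := not_and_or.mp hl
      rcases h1 with h1 | h1 <;> rcases h2 with h2 | h2 <;> simp [h1, h2]

theorem caesar_foldl (k : Int) (l : List Char) (acc : List Char) :
    l.foldl (pvCaesarStep k) acc = acc ++ l.map (fun c => pvShift c k) := by
  induction l generalizing acc with
  | nil => simp
  | cons x xs ih => simp [List.foldl_cons, caesarStep_eq, ih]

-- proof-side helper: B's current-run accumulator, expressed recursively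
def pvRleAux (cu : Char) (cnt : Int) : List Char → List Char
  | [] => cu :: PySem.Int.toChars cnt
  | x :: xs =>
      if x = cu then pvRleAux cu (cnt + 1) xs
      else (cu :: PySem.Int.toChars cnt) ++ pvRleAux x 1 xs

-- plain (already-shifted) loop body of B
def pvStepP (st : Option Char × Int × List Char) (c : Char) :
    Option Char × Int × List Char :=
  match st with
  | (some cu, cnt, out) =>
      if c = cu then (some cu, cnt + 1, out)
      else (some c, 1, out ++ (cu :: PySem.Int.toChars cnt))
  | (none, _, out) => (some c, 1, out)

theorem foldl_stepP (s : List Char) (cu : Char) (cnt : Int) (out : List Char) :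
    pvAltFlush (s.foldl pvStepP (some cu, cnt, out)) = out ++ pvRleAux cu cnt s := by
  induction s generalizing cu cnt out with
  | nil => simp [pvAltFlush, pvRleAux]
  | cons x xs ih =>
      by_cases h : x = cu
      · simp [List.foldl_cons, pvStepP, h, ih, pvRleAux]
      · simp [List.foldl_cons, pvStepP, h, ih, pvRleAux]

theorem rleAux_eq (s : List Char) (cu : Char) (cnt : Int) :
    pvRleAux cu cnt s =
      (cu :: PySem.Int.toChars (cnt + ((pvSpan cu s).1 : Int))) ++ pvRLE (pvSpan cu s).2 := by
  induction s generalizing cu cnt with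
  | nil => simp [pvRleAux, pvSpan, pvRLE]
  | cons x xs ih =>
      by_cases h : x = cu
      · have : pvRleAux cu cnt (x :: xs) = pvRleAux cu (cnt + 1) xs := by
          simp [pvRleAux, h]
        rw [this, ih]
        simp only [pvSpan, h, if_pos]
        have : cnt + 1 + ((pvSpan cu xs).1 : Int) = cnt + (((pvSpan cu xs).1 + 1 : Nat) : Int) := by
          push_cast; ring
        rw [this]
      · have hs : pvSpan cu (x :: xs) = (0, x :: xs) := by simp [pvSpan, h]
        rw [show pvRleAux cu cnt (x :: xs)
              = (cu :: PySem.Int.toChars cnt) ++ pvRleAux x 1 xs by simp [pvRleAux, h]]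
        rw [ih, hs]
        show _ = (cu :: PySem.Int.toChars (cnt + ((0 : Nat) : Int))) ++ pvRLE (x :: xs)
        rw [pvRLE]
        have h1 : (1 : Int) + ((pvSpan x xs).1 : Int) = ((pvSpan x xs).1 : Int) + 1 := by ring
        simp [h1]

-- ===== VERDICT (by name: the statement is the Claim_ definition above) =====
theorem special_cipher_spec : Claim_equal_special_cipher := by
  intro input_str rotation_num _ _
  unfold Spec_special_cipher special_cipher special_cipher_alt
  rw [show input_str.toList.foldl (pvAltStep rotation_num) (none, 0, [])
        = (input_str.toList.map (fun c => pvShift c rotation_num)).foldl pvStepP (none, 0, []) by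
      rw [List.foldl_map]; rfl]
  unfold pvCaesar
  rw [caesar_foldl]
  cases h : input_str.toList.map (fun c => pvShift c rotation_num) with
  | nil => simp [pvRLE, pvAltFlush]
  | cons c rest =>
      simp only [List.nil_append, List.foldl_cons, pvStepP]
      rw [foldl_stepP, rleAux_eq]
      rw [pvRLE]
      have h1 : (1 : Int) + ((pvSpan c rest).1 : Int) = ((pvSpan c rest).1 : Int) + 1 := by ring
      simp [h1]
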